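-- pv_equiv track=rewrite | github.com/Ricskal/Advent_of_code_2024 | Day 1/Day1.py | part2
-- ===== SOURCE A (Python) =====
-- def part2(input1, input2):
--     part2answer = 0
--     for number1 in input1:
--         same_number_counter = 0
--         for number2 in input2:
--             if number2 == number1:
--                 same_number_counter += 1
--         part2answer += number1 * same_number_counter
--     return part2answer
-- ===== SOURCE B (Python) =====
-- def part2(input1, input2):
--     a = sorted(input1)
--     b = sorted(input2)
--     i = j = 0
--     total = 0
--     while i < len(a) and j < len(b):
--         if a[i] < b[j]:
--             i += 1
--         elif b[j] < a[i]:
--             j += 1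
--         else:
--             v = a[i]
--             c1 = 0
--             while i < len(a) and a[i] == v:
--                 c1 += 1
--                 i += 1
--             c2 = 0
--             while j < len(b) and b[j] == v:
--                 c2 += 1
--                 j += 1
--             total += v * c1 * c2
--     return total
-- ===== Notes on version B (the rewrite author's own statement) =====
-- stated objective: faster
-- what changed: Replaces A's nested rescan of input2 for every element of input1 with sorting both lists once and a single two-pointer merge pass that consumes runs of equal values, adding value*run1*run2 per common value.
import Mathlib
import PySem

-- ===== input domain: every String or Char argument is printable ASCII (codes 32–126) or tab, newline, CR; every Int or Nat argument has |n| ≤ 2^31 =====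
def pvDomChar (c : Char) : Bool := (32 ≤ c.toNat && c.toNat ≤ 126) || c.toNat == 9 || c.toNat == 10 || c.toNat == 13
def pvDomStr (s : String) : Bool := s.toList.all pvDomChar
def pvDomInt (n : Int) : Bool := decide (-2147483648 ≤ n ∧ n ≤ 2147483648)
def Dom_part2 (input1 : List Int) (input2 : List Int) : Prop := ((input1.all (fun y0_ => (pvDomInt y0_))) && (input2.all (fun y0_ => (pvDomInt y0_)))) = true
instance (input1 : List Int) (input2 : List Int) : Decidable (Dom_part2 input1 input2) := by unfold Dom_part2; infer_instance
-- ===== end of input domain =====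

-- B replaces A's quadratic nested rescans with sort-both + a single two-pointer merge pass
-- over runs of equal values (objective: faster, O((n+m) log(n+m)) vs O(n*m)).

-- ===== PORT A =====
def part2 (input1 : List Int) (input2 : List Int) : Int :=
  input1.foldl (fun part2answer number1 =>
    part2answer + number1 *
      (input2.foldl (fun same_number_counter number2 =>
        if number2 == number1 then same_number_counter + 1 else same_number_counter) (0 : Int))) 0

-- ===== PORT B =====
-- the inner 'while a[i] == v' run-consuming loops of Source B
def pvTakeRun (v : Int) : List Int → Int × List Int
  | [] => (0, [])
  | x :: xs =>
    if x == v then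
      let p := pvTakeRun v xs
      (p.1 + 1, p.2)
    else (0, x :: xs)

theorem pvTakeRun_length_le (v : Int) (l : List Int) : (pvTakeRun v l).2.length ≤ l.length := by
  induction l with
  | nil => simp [pvTakeRun]
  | cons x xs ih =>
    simp only [pvTakeRun]
    split
    · exact Nat.le_succ_of_le ih
    · exact Nat.le_refl _

-- the outer merge while-loop of Source B
def pvMerge : List Int → List Int → Int
  | [], _ => 0
  | _ :: _, [] => 0
  | x :: a, y :: b =>
    if x < y then pvMerge a (y :: b)
    else if y < x then pvMerge (x :: a) b
    else
      let p := pvTakeRun x (x :: a)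
      let q := pvTakeRun x (y :: b)
      x * p.1 * q.1 + pvMerge p.2 q.2
termination_by a b => a.length + b.length
decreasing_by
  · simp
  · simp
  · have h1 : (pvTakeRun x (x :: a)).2.length ≤ a.length := by
      simp only [pvTakeRun, beq_self_eq_true, if_true]; exact pvTakeRun_length_le x a
    have h2 : (pvTakeRun x (y :: b)).2.length ≤ b.length := by
      have hy : (y == x) = true := by simp; omega
      simp only [pvTakeRun, hy, if_true]; exact pvTakeRun_length_le x b
    simp; omega

def part2_alt (input1 : List Int) (input2 : List Int) : Int :=
  pvMerge (PySem.List.sorted input1 (fun x => x) false) (PySem.List.sorted input2 (fun x => x) false)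

-- ===== PRECONDITION & SPEC =====
def Spec_part2 (input1 : List Int) (input2 : List Int) (out : Int) : Prop := out = part2_alt input1 input2
instance (input1 : List Int) (input2 : List Int) (out : Int) : Decidable (Spec_part2 input1 input2 out) := by unfold Spec_part2; infer_instance

-- ===== CLAIM (what is proved, stated in full; the proofs are below) =====
def Claim_equal_part2 : Prop := ∀ (input1 : List Int) (input2 : List Int), Dom_part2 input1 input2 → Spec_part2 input1 input2 (part2 input1 input2)

-- ===== LEMMAS AND PROOFS =====

-- the common mathematical value: Σ_{n ∈ l1} n * count_{l2}(n)
def pvSum (l1 l2 : List Int) : Int := (l1.map (fun n => n * (l2.count n : Int))).sum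

theorem pv_foldA (l2 : List Int) (l1 : List Int) (c : Int) :
    l1.foldl (fun part2answer number1 =>
      part2answer + number1 *
        (l2.foldl (fun same_number_counter number2 =>
          if number2 == number1 then same_number_counter + 1 else same_number_counter) (0 : Int))) c
    = c + pvSum l1 l2 := by
  induction l1 generalizing c with
  | nil => simp [pvSum]
  | cons h t ih =>
    rw [List.foldl_cons, ih, PySem.List.foldl_beq_add_one]
    simp [pvSum]
    ring

theorem pv_A_eq (l1 l2 : List Int) : part2 l1 l2 = pvSum l1 l2 := by
  unfold part2
  rw [pv_foldA]
  ring

theorem pvTakeRun_eq (v : Int) (l : List Int) :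
    pvTakeRun v l = (((l.takeWhile (fun x => x == v)).length : Int), l.dropWhile (fun x => x == v)) := by
  induction l with
  | nil => rfl
  | cons x xs ih =>
    by_cases hx : (x == v) = true
    · simp [pvTakeRun, hx, ih]
    · simp [pvTakeRun, hx, List.takeWhile, List.dropWhile]

theorem pv_run_all_eq (v : Int) (l : List Int) :
    ∀ n ∈ l.takeWhile (fun x => x == v), n = v := by
  intro n hn
  have := List.mem_takeWhile_imp hn
  simpa using this

theorem pv_sum_const_run (f : Int → Int) (v : Int) (l : List Int) (h : ∀ n ∈ l, n = v) :
    (l.map f).sum = (l.length : Int) * f v := by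
  induction l with
  | nil => simp
  | cons x xs ih =>
    have hx : x = v := h x (by simp)
    have : (xs.map f).sum = (xs.length : Int) * f v := ih (fun n hn => h n (by simp [hn]))
    simp [hx, this]
    ring

theorem pv_count_head_run (v : Int) (l : List Int)
    (hp : l.Pairwise (· ≤ ·)) (hlb : ∀ z ∈ l, v ≤ z) :
    l.count v = (l.takeWhile (fun x => x == v)).length := by
  induction l with
  | nil => simp
  | cons z l' ih =>
    rcases List.pairwise_cons.mp hp with ⟨hz, hp'⟩
    by_cases hzv : (z == v) = true
    · have hzv' : z = v := by simpa using hzv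
      have := ih hp' (fun w hw => hzv' ▸ hz w hw)
      simp [List.count_cons, hzv, List.takeWhile, this]
    · have hzv' : z ≠ v := by simpa using hzv
      have hvz : v < z := lt_of_le_of_ne (hlb z (by simp)) (Ne.symm hzv')
      have hc0 : l'.count v = 0 := by
        apply List.count_eq_zero.mpr
        intro hv
        exact absurd (hz v hv) (not_le.mpr hvz)
      simp [List.count_cons, hzv, List.takeWhile, hc0]

theorem pv_drop_gt (v : Int) (l : List Int)
    (hp : l.Pairwise (· ≤ ·)) (hlb : ∀ z ∈ l, v ≤ z) :
    ∀ n ∈ l.dropWhile (fun x => x == v), v < n := by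
  induction l with
  | nil => simp
  | cons z l' ih =>
    rcases List.pairwise_cons.mp hp with ⟨hz, hp'⟩
    by_cases hzv : (z == v) = true
    · have hzv' : z = v := by simpa using hzv
      intro n hn
      simp only [List.dropWhile_cons, hzv, if_true] at hn
      exact ih hp' (fun w hw => hzv' ▸ hz w hw) n hn
    · have hzv' : z ≠ v := by simpa using hzv
      have hvz : v < z := lt_of_le_of_ne (hlb z (by simp)) (Ne.symm hzv')
      intro n hn
      simp only [List.dropWhile_cons, hzv, if_false, Bool.false_eq_true] at hn
      rcases List.mem_cons.mp hn with rfl | hn'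
      · exact hvz
      · exact lt_of_lt_of_le hvz (hz n hn')

theorem pv_count_eq_drop (n v : Int) (l : List Int) (hn : n ≠ v) :
    l.count n = (l.dropWhile (fun x => x == v)).count n := by
  conv_lhs => rw [← List.takeWhile_append_dropWhile (p := fun x => x == v) (l := l)]
  rw [List.count_append]
  have h0 : (l.takeWhile (fun x => x == v)).count n = 0 := by
    apply List.count_eq_zero.mpr
    intro hmem
    exact hn (pv_run_all_eq v l n hmem)
  omega

theorem pv_merge_eq (a b : List Int)
    (ha : a.Pairwise (· ≤ ·)) (hb : b.Pairwise (· ≤ ·)) :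
    pvMerge a b = pvSum a b := by
  fun_induction pvMerge a b with
  | case1 b => simp [pvSum]
  | case2 x a => simp [pvSum]
  | case3 x a y b hxy ih =>
    rcases List.pairwise_cons.mp ha with ⟨hxa, ha'⟩
    rcases List.pairwise_cons.mp hb with ⟨hyb, hb'⟩
    have hcnt : (y :: b).count x = 0 := by
      apply List.count_eq_zero.mpr
      intro hmem
      rcases List.mem_cons.mp hmem with rfl | hmem'
      · exact absurd hxy (lt_irrefl x)
      · exact absurd (hyb x hmem') (not_le.mpr hxy)
    rw [ih ha' hb]
    simp [pvSum, hcnt]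
  | case4 x a y b hxy hyx ih =>
    rcases List.pairwise_cons.mp ha with ⟨hxa, ha'⟩
    rcases List.pairwise_cons.mp hb with ⟨hyb, hb'⟩
    rw [ih ha hb']
    unfold pvSum
    congr 1
    apply List.map_congr_left
    intro n hn
    have hny : y < n := by
      rcases List.mem_cons.mp hn with rfl | hn'
      · exact hyx
      · exact lt_of_lt_of_le hyx (hxa n hn')
    simp [List.count_cons]
    left
    omega
  | case5 x a y b hxy hyx p q ih =>
    have hxy' : x = y := le_antisymm (not_lt.mp hyx) (not_lt.mp hxy)
    subst hxy'
    have hp : p = ((((x :: a).takeWhile (fun z => z == x)).length : Int), (x :: a).dropWhile (fun z => z == x)) := pvTakeRun_eq x (x :: a)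
    have hq : q = ((((x :: b).takeWhile (fun z => z == x)).length : Int), (x :: b).dropWhile (fun z => z == x)) := pvTakeRun_eq x (x :: b)
    rw [hp, hq]
    have hA_lb : ∀ z ∈ x :: a, x ≤ z := by
      intro z hz
      rcases List.mem_cons.mp hz with rfl | hz'
      · exact le_refl z
      · exact (List.pairwise_cons.mp ha).1 z hz'
    have hB_lb : ∀ z ∈ x :: b, x ≤ z := by
      intro z hz
      rcases List.mem_cons.mp hz with rfl | hz'
      · exact le_refl z
      · exact (List.pairwise_cons.mp hb).1 z hz'
    have hcb : (x :: b).count x = ((x :: b).takeWhile (fun z => z == x)).length :=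
      pv_count_head_run x (x :: b) hb hB_lb
    have hda : List.Pairwise (· ≤ ·) ((x :: a).dropWhile (fun z => z == x)) :=
      List.Pairwise.sublist (List.dropWhile_sublist _) ha
    have hdb : List.Pairwise (· ≤ ·) ((x :: b).dropWhile (fun z => z == x)) :=
      List.Pairwise.sublist (List.dropWhile_sublist _) hb
    rw [hp, hq] at ih
    dsimp only at ih ⊢
    rw [ih hda hdb]
    have hsplit : pvSum (x :: a) (x :: b)
        = (((x :: a).takeWhile (fun z => z == x)).map (fun n => n * ((x :: b).count n : Int))).sum
          + (((x :: a).dropWhile (fun z => z == x)).map (fun n => n * ((x :: b).count n : Int))).sum := by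
      unfold pvSum
      conv_lhs => rw [← List.takeWhile_append_dropWhile (p := fun z => z == x) (l := x :: a)]
      rw [List.map_append, List.sum_append]
    have hrun := pv_sum_const_run (fun n => n * ((x :: b).count n : Int)) x
      ((x :: a).takeWhile (fun z => z == x)) (pv_run_all_eq x (x :: a))
    have hdrop : (((x :: a).dropWhile (fun z => z == x)).map (fun n => n * ((x :: b).count n : Int))).sum
        = pvSum ((x :: a).dropWhile (fun z => z == x)) ((x :: b).dropWhile (fun z => z == x)) := by
      unfold pvSum
      apply congrArg
      apply List.map_congr_left
      intro n hn
      have hnx : x < n := pv_drop_gt x (x :: a) ha hA_lb n hn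
      rw [pv_count_eq_drop n x (x :: b) (by omega)]
    simp only [] at hrun
    rw [hsplit, hrun, hdrop, hcb]
    ring

-- ===== VERDICT (by name: the statement is the Claim_ definition above) =====
theorem part2_spec : Claim_equal_part2 := by
  intro l1 l2 _
  unfold Spec_part2 part2_alt
  rw [pv_A_eq, pv_merge_eq _ _ (PySem.List.sorted_pairwise l1 (fun x => x) ) (PySem.List.sorted_pairwise l2 (fun x => x))]
  unfold pvSum
  rw [List.Perm.sum_eq (List.Perm.map _ (PySem.List.sorted_perm l1 (fun x => x) false))]
  congr 1
  apply List.map_congr_left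
  intro n _
  rw [List.Perm.count_eq (PySem.List.sorted_perm l2 (fun x => x) false)]
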